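-- pv_equiv track=rewrite | github.com/hautahi/hospital_pricing | round1_scrape/aux_check.py | list2range
-- ===== SOURCE A (Python) =====
-- def list2range(lst):
--     '''make iterator of ranges of contiguous numbers from a list of integers'''
--
--     tmplst = lst[:]
--     tmplst.sort()
--     start = tmplst[0]
--
--     currentrange = [start, start + 1]
--
--     for item in tmplst[1:]:
--         if currentrange[1] == item:
--             # contiguous
--             currentrange[1] += 1
--         else:
--             # new range start
--             yield tuple(currentrange)
--             currentrange = [item, item + 1]
--
--     # last range
--     yield tuple(currentrange)
-- ===== SOURCE B (Python) =====
-- def list2range(lst):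
--     '''make ranges of contiguous numbers from a list of integers'''
--     s = sorted(lst)
--     breaks = [(a, b) for a, b in zip(s, s[1:]) if b != a + 1]
--     starts = [s[0]] + [b for a, b in breaks]
--     ends = [a + 1 for a, b in breaks] + [s[-1] + 1]
--     return list(zip(starts, ends))
-- ===== Notes on version B (the rewrite author's own statement) =====
-- stated objective: idiomatic
-- what changed: A is an imperative generator folding a mutable [start,end] pair and yielding as it goes; B computes the break positions from adjacent pairs of the sorted list with comprehensions, builds the start and end lists separately and zips them, returning a list (not a generator).
import Mathlib
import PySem

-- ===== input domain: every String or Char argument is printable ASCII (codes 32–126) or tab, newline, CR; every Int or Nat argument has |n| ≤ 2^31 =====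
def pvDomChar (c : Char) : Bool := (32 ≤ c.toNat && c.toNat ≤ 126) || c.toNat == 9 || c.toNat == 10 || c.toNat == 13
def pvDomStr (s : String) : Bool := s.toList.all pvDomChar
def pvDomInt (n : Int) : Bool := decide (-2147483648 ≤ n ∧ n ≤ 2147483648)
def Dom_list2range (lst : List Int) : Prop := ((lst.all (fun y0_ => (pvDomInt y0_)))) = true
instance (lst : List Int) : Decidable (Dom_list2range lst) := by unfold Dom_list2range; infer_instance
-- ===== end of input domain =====

-- B replaces A's imperative generator (sort, then fold a mutable [start,end] pair, yielding closed
-- ranges) by comprehensions over adjacent pairs of the sorted list: the run breaks are computed once,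
-- starts and ends are built separately and zipped. B returns a list where A returns a generator (same
-- elements in the same order once consumed); neither mutates its argument. Objective: idiomatic.

-- ===== PORT A =====
-- A's for-loop over tmplst[1:] carries the mutable state (yielded-so-far, currentrange) as a foldl.
def list2range (lst : List Int) : List (Int × Int) :=
  let tmplst := PySem.List.sorted lst (fun x => x) false
  match tmplst with
  | [] => []  -- unreachable under Pre_: Python raises IndexError at tmplst[0]
  | start :: rest =>
    let p := rest.foldl
      (fun (p : List (Int × Int) × Int × Int) item =>
        if p.2.2 = item then
          -- contiguous
          (p.1, p.2.1, p.2.2 + 1)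
        else
          -- new range start: yield tuple(currentrange)
          (p.1 ++ [(p.2.1, p.2.2)], item, item + 1))
      ([], start, start + 1)
    -- last range
    p.1 ++ [(p.2.1, p.2.2)]

-- ===== PORT B =====
-- zip(s, s[1:]) is (s0 :: xs).zip xs; s[0] = s0, and s[-1] on the nonempty s is exactly
-- xs.getLastD s0 (last element, with head as default) — exact here since s is nonempty.
def list2range_alt (lst : List Int) : List (Int × Int) :=
  match PySem.List.sorted lst (fun x => x) false with
  | [] => []  -- unreachable under Pre_: Python raises IndexError at s[0]
  | s0 :: xs =>
    let breaks := ((s0 :: xs).zip xs).filter (fun p => p.2 != p.1 + 1)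
    let starts := s0 :: breaks.map (fun p => p.2)
    let ends := breaks.map (fun p => p.1 + 1) ++ [xs.getLastD s0 + 1]
    starts.zip ends

-- ===== PRECONDITION & SPEC =====
-- A (and B) raise IndexError on the empty list; Pre_ excludes exactly that input.
def Pre_list2range (lst : List Int) : Prop := lst ≠ []
instance (lst : List Int) : Decidable (Pre_list2range lst) := by unfold Pre_list2range; infer_instance
def pvWitness_list2range : List Int := [3, 1, 2, 7]

def Spec_list2range (lst : List Int) (out : List (Int × Int)) : Prop := out = list2range_alt lst
instance (lst : List Int) (out : List (Int × Int)) : Decidable (Spec_list2range lst out) := by unfold Spec_list2range; infer_instance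

-- ===== CLAIM (what is proved, stated in full; the proofs are below) =====
def Claim_equal_list2range : Prop := ∀ (lst : List Int), Dom_list2range lst → Pre_list2range lst → Spec_list2range lst (list2range lst)

-- ===== LEMMAS AND PROOFS =====

-- Proof-side intermediate form: both ports are shown equal to this recursion on the sorted tail.
def list2rangeGo (start fin : Int) (rest : List Int) : List (Int × Int) :=
  match rest with
  | [] => [(start, fin)]
  | x :: xs =>
    if x = fin then list2rangeGo start (fin + 1) xs
    else (start, fin) :: list2rangeGo x (x + 1) xs

-- A's fold with accumulator equals the recursion, for any starting state.
theorem foldl_eq_go (rest : List Int) : ∀ (acc : List (Int × Int)) (start fin : Int),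
    (let p := rest.foldl
      (fun (p : List (Int × Int) × Int × Int) item =>
        if p.2.2 = item then (p.1, p.2.1, p.2.2 + 1)
        else (p.1 ++ [(p.2.1, p.2.2)], item, item + 1))
      (acc, start, fin)
     p.1 ++ [(p.2.1, p.2.2)]) = acc ++ list2rangeGo start fin rest := by
  induction rest with
  | nil => intro acc start fin; simp [list2rangeGo]
  | cons x xs ih =>
    intro acc start fin
    simp only [List.foldl_cons, list2rangeGo]
    by_cases h : fin = x
    · subst h
      rw [if_pos rfl, if_pos rfl]
      exact ih acc start (fin + 1)
    · have h' : ¬ (x = fin) := fun hc => h hc.symm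
      rw [if_neg h, if_neg h']
      rw [ih (acc ++ [(start, fin)]) x (x + 1)]
      simp

-- B's zip-of-breaks form equals the recursion; the invariant is fin = prev + 1 where prev
-- is the previously consumed element (initially the head itself).
theorem go_eq_zip (xs : List Int) : ∀ (start prev : Int),
    list2rangeGo start (prev + 1) xs =
      (start :: (((prev :: xs).zip xs).filter (fun p => p.2 != p.1 + 1)).map (fun p => p.2)).zip
        ((((prev :: xs).zip xs).filter (fun p => p.2 != p.1 + 1)).map (fun p => p.1 + 1)
          ++ [xs.getLastD prev + 1]) := by
  induction xs with
  | nil => intro start prev; simp [list2rangeGo]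
  | cons y ys ih =>
    intro start prev
    simp only [List.zip_cons_cons, List.filter_cons, List.getLastD_cons, list2rangeGo]
    by_cases h : y = prev + 1
    · rw [if_pos h]; subst h
      simpa using ih start (prev + 1)
    · rw [if_neg h]
      have hb : ((y : Int) != prev + 1) = true := by simpa using h
      simp only [hb, if_true, List.map_cons, List.zip_cons_cons, List.cons_append]
      exact congrArg _ (ih y y)

-- ===== VERDICT (by name: the statement is the Claim_ definition above) =====
theorem list2range_spec : Claim_equal_list2range := by
  intro lst _ _
  unfold Spec_list2range list2range list2range_alt
  cases h : PySem.List.sorted lst (fun x => x) false with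
  | nil => rfl
  | cons s rest =>
    have h1 := foldl_eq_go rest [] s (s + 1)
    have h2 := go_eq_zip rest s s
    simpa [h2] using h1
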